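-- pv_equiv track=rewrite | github.com/eq-p99-tools/p99-login-proxy | p99_sso_login_proxy/count_display.py | _readiness_roll_up
-- ===== SOURCE A (Python) =====
-- TIER_EMOJI_LOTS = "\U0001f7e2"  # 🟢
--
-- TIER_EMOJI_SOME = "\U0001f7e1"  # 🟡
--
-- TIER_EMOJI_FEW = "\U0001f534"  # 🔴
--
-- READINESS_UNKNOWN_MARK = "?"
--
-- _READINESS_RED = 2
--
-- _READINESS_GREEN = 0
--
-- _READINESS_MISSING = 3
--
-- def _readiness_roll_up(ranks: list[int]) -> str:
--     """Worst-of rollup: unknown first; all green → green; any green + any non-green → yellow (mixed)."""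
--     if any(r == _READINESS_MISSING for r in ranks):
--         return READINESS_UNKNOWN_MARK
--     if all(r == _READINESS_GREEN for r in ranks):
--         return TIER_EMOJI_LOTS
--     has_green = any(r == _READINESS_GREEN for r in ranks)
--     if has_green:
--         return TIER_EMOJI_SOME
--     if any(r == _READINESS_RED for r in ranks):
--         return TIER_EMOJI_FEW
--     return TIER_EMOJI_SOME
-- ===== SOURCE B (Python) =====
-- TIER_EMOJI_LOTS = "\U0001f7e2"
-- TIER_EMOJI_SOME = "\U0001f7e1"
-- TIER_EMOJI_FEW = "\U0001f534"
-- READINESS_UNKNOWN_MARK = "?"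
-- _READINESS_RED = 2
-- _READINESS_GREEN = 0
-- _READINESS_MISSING = 3
--
-- def _readiness_roll_up(ranks: list[int]) -> str:
--     """Single pass over ranks maintaining four flags, then branch in priority order."""
--     has_missing = False
--     all_green = True
--     has_green = False
--     has_red = False
--     for r in ranks:
--         if r == _READINESS_MISSING:
--             has_missing = True
--         if r != _READINESS_GREEN:
--             all_green = False
--         else:
--             has_green = True
--         if r == _READINESS_RED:
--             has_red = True
--     if has_missing:
--         return READINESS_UNKNOWN_MARK
--     if all_green:
--         return TIER_EMOJI_LOTS
--     if has_green:
--         return TIER_EMOJI_SOME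
--     if has_red:
--         return TIER_EMOJI_FEW
--     return TIER_EMOJI_SOME
-- ===== Notes on version B (the rewrite author's own statement) =====
-- stated objective: alternative
-- what changed: Replaces A's four separate any/all scans with a single loop that maintains four boolean flags, branching afterwards in the same priority order.
import Mathlib
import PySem

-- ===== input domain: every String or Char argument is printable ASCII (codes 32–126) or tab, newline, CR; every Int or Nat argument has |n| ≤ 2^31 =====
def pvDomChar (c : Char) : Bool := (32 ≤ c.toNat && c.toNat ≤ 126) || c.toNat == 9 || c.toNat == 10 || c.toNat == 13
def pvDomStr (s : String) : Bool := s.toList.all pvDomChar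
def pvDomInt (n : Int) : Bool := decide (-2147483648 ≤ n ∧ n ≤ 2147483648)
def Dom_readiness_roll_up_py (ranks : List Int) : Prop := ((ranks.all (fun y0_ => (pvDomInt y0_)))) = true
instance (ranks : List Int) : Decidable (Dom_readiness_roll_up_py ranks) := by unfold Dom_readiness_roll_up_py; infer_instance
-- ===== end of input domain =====

-- B replaces A's four separate any/all scans by one loop maintaining four boolean flags (alternative decomposition, same cost).

-- ===== PORT A =====
-- four separate scans, exactly as A's any/all expressions
def readiness_roll_up_py (ranks : List Int) : String :=
  if ranks.any (fun r => r == 3) then "?"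
  else if ranks.all (fun r => r == 0) then "🟢"
  else
    let has_green := ranks.any (fun r => r == 0)
    if has_green then "🟡"
    else if ranks.any (fun r => r == 2) then "🔴"
    else "🟡"

-- ===== PORT B =====
-- one fold over the list carrying (has_missing, all_green, has_green, has_red)
def rollupStep (s : Bool × Bool × Bool × Bool) (r : Int) : Bool × Bool × Bool × Bool :=
  (if r == 3 then true else s.1,
   if r != 0 then false else s.2.1,
   if r != 0 then s.2.2.1 else true,
   if r == 2 then true else s.2.2.2)

def readiness_roll_up_py_alt (ranks : List Int) : String :=
  let s := ranks.foldl rollupStep (false, true, false, false)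
  if s.1 then "?"
  else if s.2.1 then "🟢"
  else if s.2.2.1 then "🟡"
  else if s.2.2.2 then "🔴"
  else "🟡"

-- ===== PRECONDITION & SPEC =====
def Spec_readiness_roll_up_py (ranks : List Int) (out : String) : Prop := out = readiness_roll_up_py_alt ranks
instance (ranks : List Int) (out : String) : Decidable (Spec_readiness_roll_up_py ranks out) := by unfold Spec_readiness_roll_up_py; infer_instance

-- ===== CLAIM (what is proved, stated in full; the proofs are below) =====
def Claim_equal_readiness_roll_up_py : Prop := ∀ (ranks : List Int), Dom_readiness_roll_up_py ranks → Spec_readiness_roll_up_py ranks (readiness_roll_up_py ranks)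

-- ===== LEMMAS AND PROOFS =====

theorem rollup_foldl_char (l : List Int) (hm ag hg hr : Bool) :
    l.foldl rollupStep (hm, ag, hg, hr) =
      (hm || l.any (fun r => r == 3), ag && l.all (fun r => r == 0),
       hg || l.any (fun r => r == 0), hr || l.any (fun r => r == 2)) := by
  induction l generalizing hm ag hg hr with
  | nil => simp
  | cons x xs ih =>
    simp only [List.foldl_cons, rollupStep, List.any_cons, List.all_cons, ih]
    cases e3 : (x == 3) <;> cases e0 : (x == 0) <;> cases e2 : (x == 2) <;>
      simp_all

-- ===== VERDICT (by name: the statement is the Claim_ definition above) =====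
theorem readiness_roll_up_py_spec : Claim_equal_readiness_roll_up_py := by
  intro ranks _
  unfold Spec_readiness_roll_up_py readiness_roll_up_py readiness_roll_up_py_alt
  rw [rollup_foldl_char]
  cases h3 : ranks.any (fun r => r == 3) <;>
    cases h0 : ranks.all (fun r => r == 0) <;>
      cases hg : ranks.any (fun r => r == 0) <;>
        cases h2 : ranks.any (fun r => r == 2) <;>
          simp_all
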